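-- pv_equiv track=rewrite | github.com/ankitsumitg/google-code-jam | saving_the_universe.py | calculate
-- ===== SOURCE A (Python) =====
-- def calculate(program):
--     initial = 1
--     total = 0
--     for i in program:
--         if i == 'C':
--             initial = initial * 2
--         else:
--             total += initial
--     return total
-- ===== SOURCE B (Python) =====
-- def calculate(program):
--     return sum(len(seg) * 2 ** i for i, seg in enumerate(program.split('C')))
-- ===== Notes on version B (the rewrite author's own statement) =====
-- stated objective: simpler
-- what changed: Replaces the per-character loop carrying a doubling accumulator with a split of the program on the separator character into segments and a one-line index-weighted sum of segment lengths (len(seg) * 2**i).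
import Mathlib
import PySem

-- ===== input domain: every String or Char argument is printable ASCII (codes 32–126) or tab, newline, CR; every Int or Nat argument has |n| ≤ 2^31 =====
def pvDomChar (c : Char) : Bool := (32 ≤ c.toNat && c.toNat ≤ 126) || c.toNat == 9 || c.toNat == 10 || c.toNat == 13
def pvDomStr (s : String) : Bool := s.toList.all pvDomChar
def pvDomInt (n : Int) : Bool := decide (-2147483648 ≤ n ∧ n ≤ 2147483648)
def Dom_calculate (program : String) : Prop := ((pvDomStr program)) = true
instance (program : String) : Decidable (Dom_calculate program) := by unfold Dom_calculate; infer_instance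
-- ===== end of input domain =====

-- B replaces the per-character loop with a doubling accumulator by split-on-'C' + index-weighted
-- sum of segment lengths; objective: simpler (a one-line comprehension), not faster.

-- ===== PORT A =====
-- literal port: for i in program: if i == 'C': initial *= 2 else: total += initial; return total
def calculate (program : String) : Int :=
  (program.toList.foldl
    (fun (st : Int × Int) i => if i = 'C' then (st.1 * 2, st.2) else (st.1, st.2 + st.1))
    (1, 0)).2

-- ===== PORT B =====
-- hand port of Python's str.split with the one-character separator 'C' (exact: keeps empty
-- segments, '' splits to ['']), over the code-point list
def splitC : List Char → List (List Char)
  | [] => [[]]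
  | c :: cs =>
    let r := splitC cs
    if c = 'C' then [] :: r
    else
      match r with
      | [] => [[c]]
      | h :: t => (c :: h) :: t

-- sum(len(seg) * 2**i for i, seg in enumerate(program.split('C')))
def calculate_alt (program : String) : Int :=
  (PySem.List.enumerate (splitC program.toList) 0).foldl
    (fun acc p => acc + (p.2.length : Int) * 2 ^ p.1.toNat) 0

-- ===== PRECONDITION & SPEC =====
def Spec_calculate (program : String) (out : Int) : Prop := out = calculate_alt program
instance (program : String) (out : Int) : Decidable (Spec_calculate program out) := by unfold Spec_calculate; infer_instance

-- ===== CLAIM (what is proved, stated in full; the proofs are below) =====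
def Claim_equal_calculate : Prop := ∀ (program : String), Dom_calculate program → Spec_calculate program (calculate program)

-- ===== LEMMAS AND PROOFS =====

-- weighted sum of segment lengths, back-to-front: wsum [s0,…,sk] = Σ len(si)·2^i
def wsum : List (List Char) → Int
  | [] => 0
  | h :: t => (h.length : Int) + 2 * wsum t

theorem splitC_ne_nil (cs : List Char) : splitC cs ≠ [] := by
  cases cs with
  | nil => simp [splitC]
  | cons c cs =>
    simp only [splitC]
    split
    · simp
    · cases splitC cs <;> simp

theorem enum_foldl_eq_wsum (segs : List (List Char)) (s acc : Int) (hs : 0 ≤ s) :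
    (PySem.List.enumerate segs s).foldl
      (fun acc p => acc + (p.2.length : Int) * 2 ^ p.1.toNat) acc
    = acc + 2 ^ s.toNat * wsum segs := by
  induction segs generalizing s acc with
  | nil => simp [PySem.List.enumerate_nil, wsum]
  | cons h t ih =>
    rw [PySem.List.enumerate_cons]
    simp only [List.foldl_cons]
    rw [ih (s + 1) _ (by omega)]
    have h1 : (s + 1).toNat = s.toNat + 1 := by omega
    rw [h1, wsum, pow_succ]
    ring

theorem loop_eq_wsum (cs : List Char) (init tot : Int) :
    (cs.foldl
      (fun (st : Int × Int) i => if i = 'C' then (st.1 * 2, st.2) else (st.1, st.2 + st.1))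
      (init, tot)).2 = tot + init * wsum (splitC cs) := by
  induction cs generalizing init tot with
  | nil => simp [splitC, wsum]
  | cons c cs ih =>
    simp only [List.foldl_cons, splitC]
    by_cases hc : c = 'C'
    · subst hc
      rw [if_pos rfl, if_pos rfl, ih]
      simp only [wsum, List.length_nil, Nat.cast_zero]
      ring
    · rw [if_neg hc, if_neg hc, ih]
      obtain ⟨h, t, ht⟩ := List.exists_cons_of_ne_nil (splitC_ne_nil cs)
      rw [ht]
      simp only [wsum, List.length_cons]
      push_cast
      ring

-- ===== VERDICT (by name: the statement is the Claim_ definition above) =====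
theorem calculate_spec : Claim_equal_calculate := by
  intro program _
  unfold Spec_calculate calculate calculate_alt
  rw [loop_eq_wsum, enum_foldl_eq_wsum _ 0 0 le_rfl]
  simp
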